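-- pv_equiv track=rewrite | github.com/aznn/projctEuler | eulerUtils.py | hexagonal_n
-- ===== SOURCE A (Python) =====
-- def hexagonal_n(start, n, type='set'):
--     numbers = []
--     i = start*(2*start-1)
--     inc = 4*start + 1
--     numbers.append(i)
--     count = 1
--
--     while count < n :
--         i += inc
--         inc += 4
--         count += 1
--         numbers.append(i)
--
--     if type == 'set':
--         return set(numbers)
--
--     elif type == 'list':
--         return numbers
--
--     elif type == 'dict':
--         ans = {}
--         for i in range(start, n):
--             ans[i] = numbers[i]
--         return ans
--
--     else:
--         raise Exception("Incorrect Type!")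
-- ===== SOURCE B (Python) =====
-- def hexagonal_n(start, n, type='set'):
--     numbers = [k * (2 * k - 1) for k in range(start, start + n)]
--     if type == 'set':
--         return set(numbers)
--     if type == 'list':
--         return numbers
--     if type == 'dict':
--         return dict(zip(range(start, start + n), numbers))
--     raise Exception("Incorrect Type!")
-- ===== Notes on version B (the rewrite author's own statement) =====
-- stated objective: simpler
-- what changed: B computes each hexagonal number independently by the closed form k*(2*k-1) over range(start, start+n) in one comprehension, instead of A's incremental loop maintaining a running value and a second-difference accumulator; Pre_ excludes n <= 0 (outside the natural domain of 'generate n hexagonal numbers', where A's append-before-test loop accidentally still emits one element while B returns the empty collection), type='dict' (A returns a dict keyed by absolute indices, not a List Int) and unrecognized type strings (A raises Exception).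
-- outside the precondition, e.g. on hexagonal_n(3, 0, 'list'): A returns {15}, B returns set(); on hexagonal_n(1, 3, 'dict'): A returns {1: 6, 2: 15}, B returns {1: 1, 2: 6, 3: 15}
import Mathlib
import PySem

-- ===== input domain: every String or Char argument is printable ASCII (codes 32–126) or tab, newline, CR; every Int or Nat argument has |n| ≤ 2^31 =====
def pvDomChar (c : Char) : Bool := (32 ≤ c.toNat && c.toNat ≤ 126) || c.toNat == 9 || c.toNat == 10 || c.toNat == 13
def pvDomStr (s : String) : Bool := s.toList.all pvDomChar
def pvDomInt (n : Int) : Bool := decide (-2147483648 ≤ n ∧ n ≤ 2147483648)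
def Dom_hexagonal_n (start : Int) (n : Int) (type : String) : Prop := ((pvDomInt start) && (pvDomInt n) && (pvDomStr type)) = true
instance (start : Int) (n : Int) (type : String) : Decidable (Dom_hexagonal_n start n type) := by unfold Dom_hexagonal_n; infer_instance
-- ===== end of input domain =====

-- B replaces A's incremental accumulators (running value + second difference) by the closed form
-- k*(2*k-1) mapped over the index range; objective: simpler. On n ≤ 0 the values differ (see D_).

-- ===== PORT A =====
-- A's while loop 'while count < n': count runs 1,2,…; it iterates (n-1).toNat times,
-- carrying the running value i, the increment inc, and the accumulated list.
def hexALoop : Nat → Int → Int → List Int → List Int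
  | 0, _, _, nums => nums
  | m + 1, i, inc, nums => hexALoop m (i + inc) (inc + 4) (nums ++ [i + inc])

def hexagonal_n (start : Int) (n : Int) (type : String) : List Int :=
  let i := start * (2 * start - 1)
  let numbers := hexALoop (n - 1).toNat i (4 * start + 1) [i]
  if type = "set" then PySem.Set.ofList numbers
  else if type = "list" then numbers
  -- 'dict' (returns a dict of int→int, not a List Int) and any other type (raise) are outside Pre_
  else []

-- ===== PORT B =====
def hexagonal_n_alt (start : Int) (n : Int) (type : String) : List Int :=
  let numbers := (PySem.List.pyRange start (start + n) 1).map (fun k => k * (2 * k - 1))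
  if type = "set" then PySem.Set.ofList numbers
  else if type = "list" then numbers
  -- 'dict' and unrecognized types are outside Pre_
  else []

-- ===== PRECONDITION & SPEC =====
-- Pre_ excludes n ≤ 0 (outside the natural domain of 'generate n hexagonal numbers': A's
-- append-before-test loop accidentally still emits one element there, B returns the empty
-- collection), type = "dict" (A returns a dict of int→int, not a value of the declared return
-- type List Int), and every other type string besides "set"/"list" (A raises Exception).
def Pre_hexagonal_n (start : Int) (n : Int) (type : String) : Prop :=
  1 ≤ n ∧ (type = "set" ∨ type = "list")
instance (start : Int) (n : Int) (type : String) : Decidable (Pre_hexagonal_n start n type) := by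
  unfold Pre_hexagonal_n; infer_instance

def pvWitness_hexagonal_n : Int × Int × String := (0, 1, "set")

def Spec_hexagonal_n (start : Int) (n : Int) (type : String) (out : List Int) : Prop :=
  out = hexagonal_n_alt start n type
instance (start : Int) (n : Int) (type : String) (out : List Int) : Decidable (Spec_hexagonal_n start n type out) := by
  unfold Spec_hexagonal_n; infer_instance

-- ===== CLAIM (what is proved, stated in full; the proofs are below) =====
def Claim_equal_hexagonal_n : Prop := ∀ (start : Int) (n : Int) (type : String), Dom_hexagonal_n start n type → Pre_hexagonal_n start n type → Spec_hexagonal_n start n type (hexagonal_n start n type)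

-- ===== LEMMAS AND PROOFS =====
-- A's loop, started at the state it holds after processing index s, appends exactly the
-- closed-form values of indices s+1, …, s+m.
theorem hexALoop_eq (m : Nat) (s : Int) (acc : List Int) :
    hexALoop m (s * (2 * s - 1)) (4 * s + 1) acc
      = acc ++ (PySem.List.pyRange (s + 1) (s + 1 + m) 1).map (fun k => k * (2 * k - 1)) := by
  induction m generalizing s acc with
  | zero => simp [hexALoop]
  | succ m ih =>
    have h1 : s * (2 * s - 1) + (4 * s + 1) = (s + 1) * (2 * (s + 1) - 1) := by ring
    have h2 : (4 * s + 1) + 4 = 4 * (s + 1) + 1 := by ring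
    rw [hexALoop, h1, h2, ih (s + 1)]
    push_cast
    have he : s + 1 + ((m : Int) + 1) = s + 1 + 1 + (m : Int) := by ring
    rw [he, PySem.List.pyRange_one_cons (by omega : s + 1 < s + 1 + 1 + (m : Int))]
    simp

theorem hex_numbers_eq (start n : Int) (hn : 1 ≤ n) :
    hexALoop (n - 1).toNat (start * (2 * start - 1)) (4 * start + 1) [start * (2 * start - 1)]
      = (PySem.List.pyRange start (start + n) 1).map (fun k => k * (2 * k - 1)) := by
  rw [hexALoop_eq]
  have hmax : start + n = start + 1 + ((n - 1).toNat : Int) := by omega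
  rw [hmax, PySem.List.pyRange_one_cons (by omega : start < start + 1 + ((n - 1).toNat : Int))]
  simp

-- ===== VERDICT (by name: the statements are the Claim_ definitions above) =====
theorem hexagonal_n_spec : Claim_equal_hexagonal_n := by
  intro start n type _ hpre
  unfold Spec_hexagonal_n hexagonal_n hexagonal_n_alt
  simp only [hex_numbers_eq start n hpre.1]
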